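-- pv_equiv track=rewrite | github.com/alok/shellcheck | scripts/gen_sc2xxx_lists.py | strip_haskell_comments
-- ===== SOURCE A (Python) =====
-- def strip_haskell_comments(text: str) -> str:
--     out: list[str] = []
--     i = 0
--     depth = 0
--     in_string = False
--     in_char = False
--     while i < len(text):
--         if depth > 0:
--             if text.startswith("{-", i):
--                 depth += 1
--                 i += 2
--             elif text.startswith("-}", i):
--                 depth -= 1
--                 i += 2
--             else:
--                 i += 1
--             continue
--         ch = text[i]
--         if in_string:
--             out.append(ch)
--             if ch == "\\" and i + 1 < len(text):
--                 out.append(text[i + 1])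
--                 i += 2
--                 continue
--             if ch == "\"":
--                 in_string = False
--             i += 1
--             continue
--         if in_char:
--             out.append(ch)
--             if ch == "\\" and i + 1 < len(text):
--                 out.append(text[i + 1])
--                 i += 2
--                 continue
--             if ch == "'":
--                 in_char = False
--             i += 1
--             continue
--         if text.startswith("{-", i):
--             depth += 1
--             i += 2
--             continue
--         if text.startswith("--", i):
--             while i < len(text) and text[i] != "\n":
--                 i += 1
--             continue
--         if ch == "\"":
--             in_string = True
--         if ch == "'":
--             in_char = True
--         out.append(ch)
--         i += 1
--     return "".join(out)
-- ===== SOURCE B (Python) =====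
-- def _skip_block(text: str, i: int) -> int:
--     n = len(text)
--     depth = 1
--     while depth > 0:
--         a = text.find("{-", i)
--         b = text.find("-}", i)
--         if a != -1 and (b == -1 or a < b):
--             depth += 1
--             i = a + 2
--         elif b != -1:
--             depth -= 1
--             i = b + 2
--         else:
--             return n
--     return i
--
--
-- def _copy_literal(text: str, i: int, quote: str, out: list) -> int:
--     n = len(text)
--     while i < n:
--         ch = text[i]
--         if ch == "\\" and i + 1 < n:
--             out.append(ch)
--             out.append(text[i + 1])
--             i += 2
--         elif ch == quote:
--             out.append(ch)
--             return i + 1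
--         else:
--             out.append(ch)
--             i += 1
--     return n
--
--
-- def strip_haskell_comments(text: str) -> str:
--     out: list[str] = []
--     i = 0
--     n = len(text)
--     while i < n:
--         j = n
--         for pat in ("{-", "--", '"', "'"):
--             k = text.find(pat, i)
--             if k != -1 and k < j:
--                 j = k
--         out.append(text[i:j])
--         if j == n:
--             break
--         ch = text[j]
--         if ch == "{":
--             i = _skip_block(text, j + 2)
--         elif ch == "-":
--             k = text.find("\n", j)
--             i = n if k == -1 else k
--         else:
--             out.append(ch)
--             i = _copy_literal(text, j + 1, ch, out)
--     return "".join(out)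
-- ===== Notes on version B (the rewrite author's own statement) =====
-- stated objective: faster
-- what changed: A's single while-loop driving a four-flag state machine one character at a time is replaced by a chunked scanner: the normal state jumps to the nearest delimiter with str.find and appends whole slices at once, block comments are skipped by jumping between the next comment-open/comment-close tokens, and quoted literals are copied by a dedicated helper.
import Mathlib
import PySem

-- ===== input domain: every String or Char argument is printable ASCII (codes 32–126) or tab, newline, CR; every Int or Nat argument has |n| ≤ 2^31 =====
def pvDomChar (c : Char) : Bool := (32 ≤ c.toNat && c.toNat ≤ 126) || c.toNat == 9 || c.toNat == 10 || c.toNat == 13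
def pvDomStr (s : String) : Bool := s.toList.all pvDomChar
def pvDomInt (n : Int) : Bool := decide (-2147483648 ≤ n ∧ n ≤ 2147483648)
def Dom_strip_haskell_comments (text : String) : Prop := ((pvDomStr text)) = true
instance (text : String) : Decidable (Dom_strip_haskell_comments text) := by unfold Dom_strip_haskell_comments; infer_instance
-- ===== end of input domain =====

-- B replaces A's single four-state flag-machine loop by a chunked scanner with a separate helper
-- function per lexical region built on str.find (objective: faster; measured); return values only.

-- ===== PORT A =====
-- A's while loop over index i with state (depth, in_string, in_char); the index becomes the
-- remaining suffix (i += 1 / i += 2 = dropping one / two characters), out.append goes to the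
-- result head, and the two-character lookaheads (startswith, i + 1 < len) become the cons case
-- of the suffix.  The inner "skip to newline" while-loop is List.dropWhile (exact: every skipped
-- character, including the first '-', satisfies ≠ '\n').
-- termination facts for the ports (cited by name in decreasing_by)
theorem pvLt_nil (c : Char) (cs : List Char) : ([] : List Char).length < (c :: cs).length := by
  simp
theorem pvLt_tail (c : Char) (cs : List Char) : cs.length < (c :: cs).length := by
  simp
theorem pvLt_tail2 (c d : Char) (cs2 : List Char) : cs2.length < (c :: d :: cs2).length := by
  simp only [List.length_cons]
  omega
theorem pvLt_drop (c d : Char) (cs2 : List Char) :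
    (List.dropWhile (fun x => x ≠ '\n') (d :: cs2)).length < (c :: d :: cs2).length := by
  have := List.length_dropWhile_le (fun x => decide (x ≠ '\n')) (d :: cs2)
  simp only [List.length_cons] at this ⊢
  omega

def pvAGo : List Char → Nat → Bool → Bool → List Char
  | [], _, _, _ => []
  | c :: cs, depth, instr, inchr =>
    if 0 < depth then
      match cs with
      | [] => pvAGo [] depth instr inchr
      | d :: cs2 =>
        if c = '{' ∧ d = '-' then pvAGo cs2 (depth + 1) instr inchr
        else if c = '-' ∧ d = '}' then pvAGo cs2 (depth - 1) instr inchr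
        else pvAGo (d :: cs2) depth instr inchr
    else if instr then
      match cs with
      | [] =>
        if c = '"' then c :: pvAGo [] depth false inchr
        else c :: pvAGo [] depth instr inchr
      | d :: cs2 =>
        if c = '\\' then c :: d :: pvAGo cs2 depth instr inchr
        else if c = '"' then c :: pvAGo (d :: cs2) depth false inchr
        else c :: pvAGo (d :: cs2) depth instr inchr
    else if inchr then
      match cs with
      | [] =>
        if c = '\'' then c :: pvAGo [] depth instr false
        else c :: pvAGo [] depth instr inchr
      | d :: cs2 =>
        if c = '\\' then c :: d :: pvAGo cs2 depth instr inchr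
        else if c = '\'' then c :: pvAGo (d :: cs2) depth instr false
        else c :: pvAGo (d :: cs2) depth instr inchr
    else
      match cs with
      | [] =>
        if c = '"' then c :: pvAGo [] depth true inchr
        else if c = '\'' then c :: pvAGo [] depth instr true
        else c :: pvAGo [] depth instr inchr
      | d :: cs2 =>
        if c = '{' ∧ d = '-' then pvAGo cs2 (depth + 1) instr inchr
        else if c = '-' ∧ d = '-' then
          pvAGo (List.dropWhile (fun x => x ≠ '\n') (d :: cs2)) depth instr inchr
        else if c = '"' then c :: pvAGo (d :: cs2) depth true inchr
        else if c = '\'' then c :: pvAGo (d :: cs2) depth instr true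
        else c :: pvAGo (d :: cs2) depth instr inchr
  termination_by cs _ _ _ => cs.length
  decreasing_by
    all_goals first
      | exact pvLt_nil _ _
      | exact pvLt_tail _ _
      | exact pvLt_tail2 _ _ _
      | exact pvLt_drop _ _ _

def strip_haskell_comments (text : String) : String :=
  String.mk (pvAGo text.toList 0 false false)

-- ===== PORT B =====
-- Source B's "j = min over the four str.find results; append text[i:j]" is ported as splitting the
-- suffix at the first position where one of the four delimiters starts (exact: each find returns
-- the leftmost occurrence of its pattern, so their minimum is the leftmost delimiter position,
-- and no two of the patterns can start at the same index since their first characters differ).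
def pvBSplit : List Char → List Char × List Char
  | [] => ([], [])
  | c :: cs =>
    if c = '"' ∨ c = '\'' then ([], c :: cs)
    else if (c = '{' ∨ c = '-') ∧ cs.head? = some '-' then ([], c :: cs)
    else ((c :: (pvBSplit cs).1), (pvBSplit cs).2)

-- _skip_block's "take the nearer of the next comment-open and comment-close token" is ported as a single
-- left-to-right scan returning whichever of the two tokens occurs first (exact: str.find is
-- leftmost and the two tokens cannot start at the same index); result = suffix after the close,
-- [] when the comment is unterminated (Python returns n).
def pvBSkip : Nat → List Char → List Char
  | _, [] => []
  | depth, c :: cs =>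
    match cs with
    | [] => pvBSkip depth []
    | d :: cs2 =>
      if c = '{' ∧ d = '-' then pvBSkip (depth + 1) cs2
      else if c = '-' ∧ d = '}' then (if depth = 1 then cs2 else pvBSkip (depth - 1) cs2)
      else pvBSkip depth (d :: cs2)

-- _copy_literal: copied characters in the first component, remaining suffix in the second.
def pvBCopyLit (q : Char) : List Char → List Char × List Char
  | [] => ([], [])
  -- one character left: the i + 1 < n lookahead fails, the character is copied, the loop ends
  -- (whether or not it is the closing quote, the rest is empty either way)
  | [c] => ([c], [])
  | c :: d :: cs2 =>
    if c = '\\' then ((c :: d :: (pvBCopyLit q cs2).1), (pvBCopyLit q cs2).2)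
    else if c = q then ([c], d :: cs2)
    else ((c :: (pvBCopyLit q (d :: cs2)).1), (pvBCopyLit q (d :: cs2)).2)

theorem pvBSplit_append (cs : List Char) :
    (pvBSplit cs).1 ++ (pvBSplit cs).2 = cs := by
  induction cs with
  | nil => simp [pvBSplit]
  | cons c cs ih =>
    simp only [pvBSplit]
    split_ifs <;> simp [ih]

theorem pvBSplit_snd_length (cs : List Char) : (pvBSplit cs).2.length ≤ cs.length := by
  conv_rhs => rw [← pvBSplit_append cs]
  simp

theorem pvBSkip_length (depth : Nat) (cs : List Char) :
    (pvBSkip depth cs).length ≤ cs.length := by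
  fun_induction pvBSkip depth cs <;> simp_all [pvBSkip] <;> omega

theorem pvBCopyLit_snd_length (q : Char) (cs : List Char) :
    (pvBCopyLit q cs).2.length ≤ cs.length := by
  fun_induction pvBCopyLit q cs <;> simp_all <;> omega

-- termination facts for pvBGo (cited by name in decreasing_by)
theorem pvGoalSkip (cs : List Char) (c : Char) (cs' : List Char)
    (hs : (pvBSplit cs).2 = c :: cs') : (pvBSkip 1 (cs'.drop 1)).length < cs.length := by
  have h1 := pvBSplit_snd_length cs
  have h2 := pvBSkip_length 1 (cs'.drop 1)
  have h3 : (cs'.drop 1).length ≤ cs'.length := by simp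
  rw [hs] at h1; simp only [List.length_cons] at h1; omega
theorem pvGoalLine (cs : List Char) (c : Char) (cs' : List Char)
    (hs : (pvBSplit cs).2 = c :: cs') :
    (cs'.dropWhile (fun x => x ≠ '\n')).length < cs.length := by
  have h1 := pvBSplit_snd_length cs
  have h2 := List.length_dropWhile_le (fun x => decide (x ≠ '\n')) cs'
  rw [hs] at h1; simp only [List.length_cons] at h1
  simp only [ne_eq] at h2 ⊢
  omega
theorem pvGoalLit (cs : List Char) (c : Char) (cs' : List Char)
    (hs : (pvBSplit cs).2 = c :: cs') : ((pvBCopyLit c cs').2).length < cs.length := by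
  have h1 := pvBSplit_snd_length cs
  have h2 := pvBCopyLit_snd_length c cs'
  rw [hs] at h1; simp only [List.length_cons] at h1; omega

-- Source B's main loop: emit the delimiter-free chunk, then dispatch on the delimiter found.
def pvBGo (cs : List Char) : List Char :=
  match hs : (pvBSplit cs).2 with
  | [] => (pvBSplit cs).1
  | c :: cs' =>
    if c = '{' then
      (pvBSplit cs).1 ++ pvBGo (pvBSkip 1 (cs'.drop 1))
    else if c = '-' then
      (pvBSplit cs).1 ++ pvBGo (cs'.dropWhile (fun x => x ≠ '\n'))
    else
      (pvBSplit cs).1 ++ c :: ((pvBCopyLit c cs').1 ++ pvBGo ((pvBCopyLit c cs').2))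
  termination_by cs.length
  decreasing_by
    · exact pvGoalSkip cs c cs' hs
    · exact pvGoalLine cs c cs' hs
    · exact pvGoalLit cs c cs' hs

def strip_haskell_comments_alt (text : String) : String :=
  String.mk (pvBGo text.toList)

-- ===== PRECONDITION & SPEC =====
def Spec_strip_haskell_comments (text : String) (out : String) : Prop := out = strip_haskell_comments_alt text
instance (text : String) (out : String) : Decidable (Spec_strip_haskell_comments text out) := by unfold Spec_strip_haskell_comments; infer_instance

-- ===== CLAIM (what is proved, stated in full; the proofs are below) =====
def Claim_equal_strip_haskell_comments : Prop := ∀ (text : String), Dom_strip_haskell_comments text → Spec_strip_haskell_comments text (strip_haskell_comments text)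

-- ===== LEMMAS AND PROOFS =====

-- the four delimiter shapes pvBSplit can stop at
theorem pvBSplit_delim (cs : List Char) (c : Char) (cs' : List Char)
    (h : (pvBSplit cs).2 = c :: cs') :
    c = '"' ∨ c = '\'' ∨ ((c = '{' ∨ c = '-') ∧ cs'.head? = some '-') := by
  induction cs with
  | nil => simp [pvBSplit] at h
  | cons a as ih =>
    simp only [pvBSplit] at h
    split_ifs at h with h1 h2
    · cases h; tauto
    · cases h; tauto
    · exact ih h

-- A's normal state copies characters verbatim until the next delimiter, i.e. until pvBSplit's cut.
theorem pvA_split (cs : List Char) :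
    pvAGo cs 0 false false = (pvBSplit cs).1 ++ pvAGo ((pvBSplit cs).2) 0 false false := by
  induction cs with
  | nil => simp [pvBSplit]
  | cons c cs ih =>
    simp only [pvBSplit]
    split_ifs with h1 h2
    · simp
    · simp
    · push Not at h1 h2
      cases cs with
      | nil => simp [pvAGo, pvBSplit]
      | cons d cs2 =>
        simp only [List.head?_cons] at h2
        have hne : ¬(c = '{' ∧ d = '-') := by simp; intro hc; exact by simpa [hc] using h2
        have hne2 : ¬(c = '-' ∧ d = '-') := by simp; intro hc; exact by simpa [hc] using h2
        simp only [pvAGo]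
        simp [hne, hne2, h1.1, h1.2, ih]

-- A's depth > 0 state ends exactly where _skip_block says the comment ends.
theorem pvA_skip (cs : List Char) (depth : Nat) (h : 0 < depth) :
    pvAGo cs depth false false = pvAGo (pvBSkip depth cs) 0 false false := by
  fun_induction pvBSkip depth cs with
  | case1 depth => simp [pvAGo, pvBSkip]
  | case2 depth c => simp [pvAGo, pvBSkip, h]
  | case3 depth c d cs2 hcd ih =>
    simp only [pvAGo, if_pos h, if_pos hcd]
    exact ih (by omega)
  | case4 c d cs2 h1 h2 =>
    simp only [pvAGo, if_pos h, if_neg h1, if_pos h2]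
  | case5 depth c d cs2 h1 h2 hne ih =>
    simp only [pvAGo, if_pos h, if_neg h1, if_pos h2]
    exact ih (by omega)
  | case6 depth c d cs2 h1 h2 ih =>
    simp only [pvAGo, if_pos h, if_neg h1, if_neg h2]
    exact ih h

-- A's in_string state emits exactly _copy_literal's characters.
theorem pvA_string (cs : List Char) :
    pvAGo cs 0 true false =
      (pvBCopyLit '"' cs).1 ++ pvAGo ((pvBCopyLit '"' cs).2) 0 false false := by
  fun_induction pvBCopyLit '"' cs with
  | case1 => simp [pvAGo]
  | case2 c => simp [pvAGo]
  | case3 d cs2 ih => simp [pvAGo, ih]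
  | case4 d cs2 h => simp [pvAGo]
  | case5 c d cs2 h1 h2 ih => simp [pvAGo, h1, h2, ih]

-- A's in_char state emits exactly _copy_literal's characters.
theorem pvA_char (cs : List Char) :
    pvAGo cs 0 false true =
      (pvBCopyLit '\'' cs).1 ++ pvAGo ((pvBCopyLit '\'' cs).2) 0 false false := by
  fun_induction pvBCopyLit '\'' cs with
  | case1 => simp [pvAGo]
  | case2 c => simp [pvAGo]
  | case3 d cs2 ih => simp [pvAGo, ih]
  | case4 d cs2 h => simp [pvAGo]
  | case5 c d cs2 h1 h2 ih => simp [pvAGo, h1, h2, ih]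

theorem pvAB (cs : List Char) : pvAGo cs 0 false false = pvBGo cs := by
  fun_induction pvBGo cs with
  | case1 cs hs => rw [pvA_split cs, hs]; simp [pvAGo]
  | case2 cs cs' hs ih =>
    have hd := pvBSplit_delim cs _ _ hs
    have hh : cs'.head? = some '-' := by
      rcases hd with h | h | ⟨-, h⟩
      · exact absurd h (by decide)
      · exact absurd h (by decide)
      · exact h
    cases cs' with
    | nil => simp at hh
    | cons e es =>
      simp only [List.head?_cons, Option.some.injEq] at hh
      subst hh
      simp only [List.drop_succ_cons, List.drop_zero] at ih
      rw [pvA_split cs, hs]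
      simp [pvAGo, pvA_skip es 1 (by omega), ih]
  | case3 cs cs' hs h ih =>
    have hd := pvBSplit_delim cs _ _ hs
    have hh : cs'.head? = some '-' := by
      rcases hd with h | h | ⟨-, h⟩
      · exact absurd h (by decide)
      · exact absurd h (by decide)
      · exact h
    cases cs' with
    | nil => simp at hh
    | cons e es =>
      simp only [List.head?_cons, Option.some.injEq] at hh
      subst hh
      rw [pvA_split cs, hs]
      simp only [pvAGo]
      simp
      simpa using ih
  | case4 cs c cs' hs h1 h2 ih =>
    have hd := pvBSplit_delim cs _ _ hs
    have hq : c = '"' ∨ c = '\'' := by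
      rcases hd with h | h | ⟨h, -⟩
      · exact Or.inl h
      · exact Or.inr h
      · rcases h with h | h
        · exact absurd h h1
        · exact absurd h h2
    rw [pvA_split cs, hs]
    rcases hq with hq | hq <;> subst hq
    · have hA : pvAGo ('"' :: cs') 0 false false = '"' :: pvAGo cs' 0 true false := by
        cases cs' <;> simp [pvAGo]
      rw [hA, pvA_string cs', ih]
    · have hA : pvAGo ('\'' :: cs') 0 false false = '\'' :: pvAGo cs' 0 false true := by
        cases cs' <;> simp [pvAGo]
      rw [hA, pvA_char cs', ih]

-- ===== VERDICT (by name: the statement is the Claim_ definition above) =====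
theorem strip_haskell_comments_spec : Claim_equal_strip_haskell_comments := by
  intro text _
  unfold Spec_strip_haskell_comments strip_haskell_comments strip_haskell_comments_alt
  rw [pvAB]
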